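-- pv_equiv track=rewrite | github.com/brookelynnstillwell/codefinity-python-for-biologists | dna_and_sequence_analysis/challenge_motif_search_in_multiple_sequences/main.py | find_motif2_positions
-- ===== SOURCE A (Python) =====
-- def find_motif2_positions(sequences2, motif2):
--     result2 = {}
--     motif2_length = len(motif2)
--     for seq2 in sequences2:
--         positions2 = []
--         for i in range(len(seq2) - motif2_length + 1):
--             if seq2[i:i+motif2_length] == motif2:
--                 positions2.append(i)
--         result2[seq2] = positions2
--     return result2
-- ===== SOURCE B (Python) =====
-- def find_motif2_positions(sequences2, motif2):
--     result2 = {}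
--     for seq2 in sequences2:
--         positions2 = []
--         i = seq2.find(motif2)
--         while i != -1:
--             positions2.append(i)
--             i = seq2.find(motif2, i + 1)
--         result2[seq2] = positions2
--     return result2
-- ===== Notes on version B (the rewrite author's own statement) =====
-- stated objective: idiomatic
-- what changed: Replaces the per-index slice-and-compare scan with a chain of str.find calls: each sequence is searched by repeatedly asking for the next occurrence starting after the previous hit, the way an experienced Python developer would write it; no length-m slice is built or compared at non-matching positions.
import Mathlib
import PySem

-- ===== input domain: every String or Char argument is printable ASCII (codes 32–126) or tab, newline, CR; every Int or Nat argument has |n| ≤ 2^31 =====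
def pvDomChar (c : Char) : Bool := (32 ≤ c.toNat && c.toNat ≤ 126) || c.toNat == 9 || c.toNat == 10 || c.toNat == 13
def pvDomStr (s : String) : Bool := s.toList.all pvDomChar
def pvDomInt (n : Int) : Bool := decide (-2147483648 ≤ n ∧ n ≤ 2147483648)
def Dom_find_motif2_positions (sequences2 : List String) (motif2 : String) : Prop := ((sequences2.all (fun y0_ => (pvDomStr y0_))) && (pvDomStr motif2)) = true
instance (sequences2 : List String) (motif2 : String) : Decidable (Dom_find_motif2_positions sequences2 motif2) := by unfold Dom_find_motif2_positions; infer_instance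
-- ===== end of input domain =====

-- B replaces A's per-index slice-and-compare scan by a chain of str.find calls (next occurrence after
-- the previous hit) — the idiomatic Python way; the same dict of positions is returned.


-- ===== PORT A =====
def find_motif2_positions (sequences2 : List String) (motif2 : String) : List (String × List Int) :=
  let motif2_length : Int := PySem.Str.len motif2
  (sequences2.foldl
    (fun (result2 : PySem.Dict String (List Int)) seq2 =>
      let positions2 : List Int :=
        (PySem.List.pyRange 0 (PySem.Str.len seq2 - motif2_length + 1) 1).foldl
          (fun acc i =>
            if PySem.Str.slice seq2 (some i) (some (i + motif2_length)) == motif2 then acc ++ [i]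
            else acc) []
      result2.insert seq2 positions2)
    PySem.Dict.empty).items

-- ===== PORT B =====
-- the 'while i != -1' loop of Source B; fuel = len(seq)+2 always suffices (each found index is strictly larger)
def pvFindLoop (s sub : List Char) : Nat → Int → List Int
  | 0, _ => []
  | fuel+1, i =>
    if i = -1 then []
    else i :: pvFindLoop s sub fuel (PySem.Chars.findFrom s sub (i + 1) none)

def pvBPositions (seq2 motif2 : String) : List Int :=
  pvFindLoop seq2.toList motif2.toList (seq2.toList.length + 2) (PySem.Str.find seq2 motif2)

def find_motif2_positions_alt (sequences2 : List String) (motif2 : String) : List (String × List Int) :=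
  (sequences2.foldl
    (fun (result2 : PySem.Dict String (List Int)) seq2 =>
      result2.insert seq2 (pvBPositions seq2 motif2))
    PySem.Dict.empty).items

-- ===== PRECONDITION & SPEC =====
def Spec_find_motif2_positions (sequences2 : List String) (motif2 : String) (out : List (String × List Int)) : Prop := out = find_motif2_positions_alt sequences2 motif2
instance (sequences2 : List String) (motif2 : String) (out : List (String × List Int)) : Decidable (Spec_find_motif2_positions sequences2 motif2 out) := by unfold Spec_find_motif2_positions; infer_instance

-- ===== CLAIM (what is proved, stated in full; the proofs are below) =====
def Claim_equal_find_motif2_positions : Prop := ∀ (sequences2 : List String) (motif2 : String), Dom_find_motif2_positions sequences2 motif2 → Spec_find_motif2_positions sequences2 motif2 (find_motif2_positions sequences2 motif2)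

-- ===== LEMMAS AND PROOFS =====

-- Python quirk kept by PySem: a start past len(s) gives -1 even for sub = ''
theorem pvFindFrom_gt_len (s sub : List Char) (k : Int) (h : (s.length : Int) < k) :
    PySem.Chars.findFrom s sub k none = -1 := by
  simp only [PySem.Chars.findFrom]
  have h0 : ¬ k < 0 := by omega
  simp only [h0, if_false, if_pos (show (s.length : Int) < k from h)]

-- the loop body of the while loop applied to -1 stops
theorem pvFindLoop_neg_one (s sub : List Char) (fuel : Nat) :
    pvFindLoop s sub (fuel + 1) (-1) = [] := by
  simp [pvFindLoop]

-- A's slice-equality test at a nonnegative index is exactly "motif is a prefix of the drop"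
theorem pvSliceEq (s m : List Char) (i : Int) (h : 0 ≤ i) :
    (PySem.List.slice s (some i) (some (i + (m.length : Int))) = m) ↔ m <+: s.drop i.toNat := by
  have hb : (0 : Int) ≤ i + (m.length : Int) := by positivity
  rw [PySem.List.slice_toNat s h hb]
  have htn : (i + (m.length : Int)).toNat - i.toNat = m.length := by omega
  rw [htn]
  constructor
  · intro he; exact List.prefix_iff_eq_take.mpr he.symm
  · intro hp; exact (List.prefix_iff_eq_take.mp hp).symm

-- the main loop invariant: the find-chain starting at k lists exactly the match positions ≥ k, in order
theorem pvChain (s sub : List Char) :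
    ∀ (fuel k : Nat), s.length + 2 ≤ fuel + k →
    pvFindLoop s sub fuel (PySem.Chars.findFrom s sub (k : Int) none) =
      (PySem.List.pyRange (k : Int) ((s.length : Int) - (sub.length : Int) + 1) 1).filter
        (fun i => decide (sub <+: s.drop i.toNat)) := by
  intro fuel
  induction fuel with
  | zero =>
    intro k hk
    rw [PySem.List.pyRange_one_eq_nil (by omega)]
    rfl
  | succ fuel ih =>
    intro k hk
    by_cases hkL : k ≤ s.length
    · by_cases hneg : PySem.Chars.findFrom s sub (k : Int) none = -1
      · rw [hneg, pvFindLoop_neg_one]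
        symm
        rw [List.filter_eq_nil_iff]
        intro i hi
        have hmem := (PySem.List.mem_pyRange_one).mp hi
        have hnin := (PySem.Chars.findFrom_natCast_eq_neg_one_iff s sub k hkL).mp hneg
        simp only [decide_eq_true_eq]
        intro hpre
        apply hnin
        have h1 : s.drop i.toNat = (s.drop k).drop (i.toNat - k) := by
          rw [List.drop_drop]; congr 1; omega
        rw [h1] at hpre
        exact hpre.isInfix.trans (List.drop_suffix _ _).isInfix
      · obtain ⟨hkr, hpre, hmin⟩ := PySem.Chars.findFrom_natCast_spec s sub k hkL hneg
        set r : Int := PySem.Chars.findFrom s sub (k : Int) none with hr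
        have hrL : r ≤ (s.length : Int) := by
          rw [hr, PySem.Chars.findFrom_natCast s sub k hkL]
          have := PySem.Chars.find_le_length (s.drop k) sub
          simp only [List.length_drop] at this
          split <;> omega
        have hr0 : (0 : Int) ≤ r := le_trans (by positivity) hkr
        have hmle : sub.length ≤ s.length - r.toNat := by
          have := hpre.length_le
          simp only [List.length_drop] at this
          exact this
        have hrB : r < (s.length : Int) - (sub.length : Int) + 1 := by omega
        -- unfold one loop step
        have hstep : pvFindLoop s sub (fuel + 1) r
            = r :: pvFindLoop s sub fuel (PySem.Chars.findFrom s sub (r + 1) none) := by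
          simp [pvFindLoop, hneg]
        rw [hstep]
        have hr1 : r + 1 = ((r.toNat + 1 : Nat) : Int) := by omega
        rw [hr1, ih (r.toNat + 1) (by omega)]
        -- split the range at r and r+1
        rw [PySem.List.pyRange_one_append (k : Int) r ((s.length : Int) - (sub.length : Int) + 1)
              hkr (le_of_lt hrB),
            PySem.List.pyRange_one_cons hrB]
        rw [List.filter_append]
        have hnilpart : (PySem.List.pyRange (k : Int) r 1).filter
            (fun i => decide (sub <+: s.drop i.toNat)) = [] := by
          rw [List.filter_eq_nil_iff]
          intro i hi
          have hmem := (PySem.List.mem_pyRange_one).mp hi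
          simp only [decide_eq_true_eq]
          exact hmin i.toNat (by omega) (by omega)
        rw [hnilpart]
        have hrfix : ((r.toNat : Int)) = r := Int.toNat_of_nonneg hr0
        simp [hpre, hr1]
    · -- start past the end of the string: find returns -1, and the range is empty
      rw [pvFindFrom_gt_len s sub (k : Int) (by omega), pvFindLoop_neg_one]
      rw [PySem.List.pyRange_one_eq_nil (by omega)]
      rfl

-- per sequence, B's find-chain equals A's scan
theorem pvPositionsEq (seq2 motif2 : String) :
    (PySem.List.pyRange 0 (PySem.Str.len seq2 - PySem.Str.len motif2 + 1) 1).foldl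
        (fun acc i =>
          if PySem.Str.slice seq2 (some i) (some (i + PySem.Str.len motif2)) == motif2 then acc ++ [i]
          else acc) []
      = pvBPositions seq2 motif2 := by
  have hcond : ∀ i : Int, 0 ≤ i →
      (PySem.Str.slice seq2 (some i) (some (i + PySem.Str.len motif2)) == motif2)
        = decide (motif2.toList <+: seq2.toList.drop i.toNat) := by
    intro i h0
    have hb : (PySem.Str.slice seq2 (some i) (some (i + PySem.Str.len motif2)) == motif2)
        = decide ((PySem.Str.slice seq2 (some i) (some (i + PySem.Str.len motif2))).toList
            = motif2.toList) := by
      by_cases he : PySem.Str.slice seq2 (some i) (some (i + PySem.Str.len motif2)) = motif2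
      · rw [he]; simp
      · have hne : (PySem.Str.slice seq2 (some i) (some (i + PySem.Str.len motif2))).toList
            ≠ motif2.toList := fun hl => he (String.toList_inj.mp hl)
        rw [beq_eq_false_iff_ne.mpr he, decide_eq_false hne]
    rw [hb]
    have hlist : (PySem.Str.slice seq2 (some i) (some (i + PySem.Str.len motif2))).toList
        = PySem.List.slice seq2.toList (some i) (some (i + (motif2.toList.length : Int))) := by
      simp [PySem.Str.toList_slice]
    rw [hlist]
    exact decide_eq_decide.mpr (pvSliceEq seq2.toList motif2.toList i h0)
  have hA : (PySem.List.pyRange 0 (PySem.Str.len seq2 - PySem.Str.len motif2 + 1) 1).foldl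
        (fun acc i =>
          if PySem.Str.slice seq2 (some i) (some (i + PySem.Str.len motif2)) == motif2 then acc ++ [i]
          else acc) []
      = (PySem.List.pyRange 0 (PySem.Str.len seq2 - PySem.Str.len motif2 + 1) 1).foldl
        (fun acc i =>
          if decide (motif2.toList <+: seq2.toList.drop i.toNat) then acc ++ [i]
          else acc) [] := by
    apply PySem.List.foldl_congr_mem
    intro acc i hi
    rw [hcond i ((PySem.List.mem_pyRange_one).mp hi).1]
  rw [hA]
  rw [show (fun (acc : List Int) (i : Int) =>
        if decide (motif2.toList <+: seq2.toList.drop i.toNat) then acc ++ [i] else acc)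
      = fun acc i =>
        if (fun j : Int => decide (motif2.toList <+: seq2.toList.drop j.toNat)) i = true
        then acc ++ [id i] else acc from by funext acc i; simp]
  rw [PySem.List.foldl_append_if (fun j : Int => decide (motif2.toList <+: seq2.toList.drop j.toNat)) id]
  rw [List.nil_append, List.map_id]
  unfold pvBPositions
  have hfind : PySem.Str.find seq2 motif2
      = PySem.Chars.findFrom seq2.toList motif2.toList ((0 : Nat) : Int) none := by
    simp
  rw [hfind, pvChain seq2.toList motif2.toList (seq2.toList.length + 2) 0 (by omega)]
  have hlen : PySem.Str.len motif2 = (motif2.toList.length : Int) := by simp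
  have hlens : PySem.Str.len seq2 = (seq2.toList.length : Int) := by simp
  rw [hlen, hlens]
  norm_num

-- ===== VERDICT (by name: the statement is the Claim_ definition above) =====
theorem find_motif2_positions_spec : Claim_equal_find_motif2_positions := by
  intro sequences2 motif2 _
  unfold Spec_find_motif2_positions
  simp only [find_motif2_positions, find_motif2_positions_alt]
  congr 1
  apply PySem.List.foldl_congr_mem
  intro d seq2 _
  rw [pvPositionsEq seq2 motif2]
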